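-- pv_equiv track=rewrite | github.com/pwr-ai/ai-department-website | reorder_authors.py | order_authors_in_roles
-- ===== SOURCE A (Python) =====
-- from typing import List, Dict
--
-- def order_authors_in_roles(user_mapping: Dict[str, dict]) -> List[str]:
--     # grupujemy autorów według ról i sortujemy w obrębie każdej roli
--     roles_dict = {}
--     for author, info in user_mapping.items():
--         role = info['role'] or ''
--         if role not in roles_dict:
--             roles_dict[role] = []
--         roles_dict[role].append(author)
--
--     # sortujemy autorów w każdej roli
--     for role in roles_dict:
--         roles_dict[role] = sorted(roles_dict[role])
--
--     return roles_dict
-- ===== SOURCE B (Python) =====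
-- from typing import List, Dict
--
-- def order_authors_in_roles(user_mapping: Dict[str, dict]) -> List[str]:
--     # one global sort, then a single grouping pass: each bucket emerges pre-sorted
--     roles_dict = {}
--     for info in user_mapping.values():
--         roles_dict.setdefault(info['role'] or '', [])
--     for author, info in sorted(user_mapping.items(), key=lambda kv: kv[0]):
--         roles_dict[info['role'] or ''].append(author)
--     return roles_dict
-- ===== Notes on version B (the rewrite author's own statement) =====
-- stated objective: alternative
-- what changed: B replaces A's 'group by role, then sort each bucket' with 'sort all authors once by name, pre-create the buckets in first-occurrence order, then one grouping pass over the globally sorted items', so no per-bucket sort is performed.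
import Mathlib
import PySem

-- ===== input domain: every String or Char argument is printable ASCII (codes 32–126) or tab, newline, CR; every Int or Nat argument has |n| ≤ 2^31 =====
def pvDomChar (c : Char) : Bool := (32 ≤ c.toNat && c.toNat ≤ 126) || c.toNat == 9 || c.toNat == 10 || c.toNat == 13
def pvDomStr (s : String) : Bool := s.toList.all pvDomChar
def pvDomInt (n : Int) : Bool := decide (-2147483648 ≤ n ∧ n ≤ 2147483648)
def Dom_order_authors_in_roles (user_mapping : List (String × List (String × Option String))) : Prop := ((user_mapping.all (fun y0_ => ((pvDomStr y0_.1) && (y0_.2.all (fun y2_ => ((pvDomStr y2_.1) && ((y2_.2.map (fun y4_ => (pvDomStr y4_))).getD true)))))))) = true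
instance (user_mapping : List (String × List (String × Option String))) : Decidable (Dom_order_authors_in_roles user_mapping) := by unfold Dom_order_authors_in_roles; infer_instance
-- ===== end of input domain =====

-- ===== PORT A =====
-- B sorts all authors once and fills the buckets in one grouping pass instead of sorting each bucket (alternative decomposition, same cost).
-- shared transliteration of the subexpression  info['role'] or ''  (both Pythons contain it verbatim);
-- outside Pre_ (no 'role' key) Python raises KeyError, here get? is none and the value is unclaimed
def pvRoleOf (info : List (String × Option String)) : String :=
  (((PySem.Dict.mk info).get? "role").getD none).getD ""

def order_authors_in_roles (user_mapping : List (String × List (String × Option String))) : List (String × List String) :=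
  let roles_dict : PySem.Dict String (List String) :=
    user_mapping.foldl (fun d p =>
      let role := pvRoleOf p.2
      let d := if d.contains role then d else d.insert role ([] : List String)
      d.modify role [] (fun l => l ++ [p.1])) PySem.Dict.empty
  let roles_dict :=
    roles_dict.keys.foldl (fun d role => d.modify role [] (fun l => PySem.List.sorted l (fun x => x))) roles_dict
  roles_dict.items

-- ===== PORT B =====
def order_authors_in_roles_alt (user_mapping : List (String × List (String × Option String))) : List (String × List String) :=
  let roles_dict : PySem.Dict String (List String) :=
    user_mapping.foldl (fun d p => d.setdefault (pvRoleOf p.2) ([] : List String)) PySem.Dict.empty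
  let roles_dict :=
    (PySem.List.sorted user_mapping (fun kv => kv.1)).foldl
      (fun d p => d.modify (pvRoleOf p.2) [] (fun l => l ++ [p.1])) roles_dict
  roles_dict.items

-- ===== PRECONDITION & SPEC =====
-- Pre_ excludes exactly the inputs where some info dict lacks the 'role' key: there Python A (and B) raise KeyError.
def Pre_order_authors_in_roles (user_mapping : List (String × List (String × Option String))) : Prop :=
  ∀ p ∈ user_mapping, "role" ∈ p.2.map Prod.fst
instance (user_mapping : List (String × List (String × Option String))) : Decidable (Pre_order_authors_in_roles user_mapping) := by unfold Pre_order_authors_in_roles; infer_instance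
def pvWitness_order_authors_in_roles : (List (String × List (String × Option String))) :=
  [("bob", [("role", some "dev")]), ("amy", [("role", none)])]

def Spec_order_authors_in_roles (user_mapping : List (String × List (String × Option String))) (out : List (String × List String)) : Prop := out = order_authors_in_roles_alt user_mapping
instance (user_mapping : List (String × List (String × Option String))) (out : List (String × List String)) : Decidable (Spec_order_authors_in_roles user_mapping out) := by unfold Spec_order_authors_in_roles; infer_instance

-- ===== CLAIM (what is proved, stated in full; the proofs are below) =====
def Claim_equal_order_authors_in_roles : Prop := ∀ (user_mapping : List (String × List (String × Option String))), Dom_order_authors_in_roles user_mapping → Pre_order_authors_in_roles user_mapping → Spec_order_authors_in_roles user_mapping (order_authors_in_roles user_mapping)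

-- ===== LEMMAS AND PROOFS =====

-- A's compound step 'create-bucket-if-missing, then append' is the plain grouping modify
theorem pv_stepA_eq (d : PySem.Dict String (List String)) (k a : String) :
    ((if d.contains k then d else d.insert k ([] : List String)).modify k [] (fun l => l ++ [a]))
      = d.modify k [] (fun l => l ++ [a]) := by
  cases hb : d.contains k with
  | true => simp
  | false =>
    simp only [Bool.false_eq_true, if_false]
    simp only [PySem.Dict.modify]
    rw [PySem.Dict.getD_insert_self]
    apply PySem.Dict.ext
    rw [PySem.Dict.items_insert_of_contains _ _ (PySem.Dict.contains_insert_self d k ([] : List String)),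
        PySem.Dict.items_insert_of_not_contains _ _ hb,
        PySem.Dict.items_insert_of_not_contains _ _ hb,
        PySem.Dict.getD_of_not_contains _ _ hb]
    have hmap : ∀ p ∈ d.items,
        (if (p.1 == k) = true then (k, ([] : List String) ++ [a]) else p) = p := by
      intro p hp
      have hne : (p.1 == k) = false := by
        cases hq : (p.1 == k)
        · rfl
        · have h2 : d.contains k = true := by
            simp only [PySem.Dict.contains, List.any_eq_true]
            exact ⟨p, hp, hq⟩
          rw [hb] at h2
          exact absurd h2 (by simp)
      simp [hne]
    rw [List.map_append, List.map_congr_left hmap]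
    simp

theorem pv_grouped_getD (l : List (String × List (String × Option String)))
    (d : PySem.Dict String (List String)) (r : String) :
    (l.foldl (fun d p => d.modify (pvRoleOf p.2) [] (fun t => t ++ [p.1])) d).getD r []
      = d.getD r [] ++ ((l.filter (fun p => pvRoleOf p.2 == r)).map (fun p => p.1)) := by
  have h := PySem.Dict.getD_foldl_modify_append (l.map (fun p => (pvRoleOf p.2, p.1))) d r
  rw [List.foldl_map] at h
  simpa [List.filter_map, List.map_map, Function.comp_def] using h

theorem pv_grouped_keys (l : List (String × List (String × Option String)))
    (d : PySem.Dict String (List String)) :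
    (l.foldl (fun d p => d.modify (pvRoleOf p.2) [] (fun t => t ++ [p.1])) d).keys
      = PySem.Set.update d.keys (l.map (fun p => pvRoleOf p.2)) :=
  PySem.Dict.keys_foldl_modify_key l (fun p => pvRoleOf p.2) [] (fun _ p => (fun t => t ++ [p.1])) d

theorem pv_update_subset (s : List String) (xs : List String) (h : ∀ x ∈ xs, x ∈ s) :
    PySem.Set.update s xs = s := by
  rw [PySem.Set.update_eq_append_filter]
  have : ∀ y ∈ PySem.Set.ofList xs, ¬ ((!PySem.Set.contains s y) = true) := by
    intro y hy
    have : y ∈ s := h y ((PySem.Set.mem_ofList xs y).mp hy)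
    simp [PySem.Set.contains, this]
  rw [List.filter_eq_nil_iff.mpr this, List.append_nil]

-- the sorted-each-bucket list IS the bucket of the globally sorted list
theorem pv_bucket_sorted (um : List (String × List (String × Option String))) (r : String) :
    PySem.List.sorted ((um.filter (fun p => pvRoleOf p.2 == r)).map (fun p => p.1)) (fun x => x)
      = ((PySem.List.sorted um (fun kv => kv.1)).filter (fun p => pvRoleOf p.2 == r)).map (fun p => p.1) := by
  apply PySem.List.sorted_id_eq_of_perm_of_pairwise
  · exact ((PySem.List.sorted_perm um (fun kv => kv.1) false).filter _).map _
  · exact ((PySem.List.sorted_pairwise um (fun kv => kv.1)).filter _).map _ (fun a b hab => hab)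

-- second pass of A: value at r becomes sorted, once, for keys in a Nodup key list
theorem pv_sortpass_getD (ks : List String) (hnd : ks.Nodup)
    (d : PySem.Dict String (List String)) (r : String) :
    (ks.foldl (fun d k => d.modify k [] (fun l => PySem.List.sorted l (fun x => x))) d).getD r []
      = if r ∈ ks then PySem.List.sorted (d.getD r []) (fun x => x) else d.getD r [] := by
  induction ks generalizing d with
  | nil => simp
  | cons k t ih =>
    simp only [List.foldl_cons]
    rw [ih (List.nodup_cons.mp hnd).2]
    by_cases hr : r = k
    · subst hr
      have hnotin : r ∉ t := (List.nodup_cons.mp hnd).1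
      simp [hnotin, PySem.Dict.getD_modify_self]
    · rw [PySem.Dict.getD_modify_of_ne _ _ _ hr]
      simp [hr]

theorem pv_sortpass_keys (ks : List String) (d : PySem.Dict String (List String))
    (h : ∀ k ∈ ks, k ∈ d.keys) :
    (ks.foldl (fun d k => d.modify k [] (fun l => PySem.List.sorted l (fun x => x))) d).keys = d.keys := by
  rw [PySem.Dict.keys_foldl_modify_key ks (fun k => k) [] (fun _ _ => (fun l => PySem.List.sorted l (fun x => x))) d]
  simpa using pv_update_subset d.keys ks h

-- B's first pass: the keys are the roles in first-occurrence order, every value is []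
theorem pv_setdef_keys (l : List (String × List (String × Option String)))
    (d : PySem.Dict String (List String)) :
    (l.foldl (fun d p => d.setdefault (pvRoleOf p.2) ([] : List String)) d).keys
      = PySem.Set.update d.keys (l.map (fun p => pvRoleOf p.2)) := by
  induction l generalizing d with
  | nil => simp [PySem.Set.update_nil]
  | cons p t ih =>
    simp only [List.foldl_cons, List.map_cons, PySem.Set.update_cons]
    rw [ih]
    congr 1
    cases h : d.contains (pvRoleOf p.2) with
    | true =>
      rw [PySem.Dict.setdefault_of_contains _ _ h]
      have hm : pvRoleOf p.2 ∈ d.keys := (PySem.Dict.contains_iff_mem_keys _ _).mp h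
      simp [PySem.Set.add, PySem.Set.contains, hm]
    | false =>
      rw [PySem.Dict.setdefault_of_not_contains _ _ h,
          PySem.Dict.keys_insert_of_not_contains _ _ h]
      have hm : pvRoleOf p.2 ∉ d.keys := fun hmm =>
        absurd ((PySem.Dict.contains_iff_mem_keys _ _).mpr hmm) (by simp [h])
      simp [PySem.Set.add, PySem.Set.contains, hm]

theorem pv_setdef_getD (l : List (String × List (String × Option String)))
    (d : PySem.Dict String (List String)) (h : ∀ r, d.getD r [] = []) :
    ∀ r, (l.foldl (fun d p => d.setdefault (pvRoleOf p.2) ([] : List String)) d).getD r [] = [] := by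
  induction l generalizing d with
  | nil => exact h
  | cons p t ih =>
    simp only [List.foldl_cons]
    apply ih
    intro r
    cases hc : d.contains (pvRoleOf p.2) with
    | true => rw [PySem.Dict.setdefault_of_contains _ _ hc]; exact h r
    | false =>
      rw [PySem.Dict.setdefault_of_not_contains _ _ hc, PySem.Dict.getD_insert]
      split
      · rfl
      · exact h r

theorem pv_main (um : List (String × List (String × Option String))) :
    order_authors_in_roles um = order_authors_in_roles_alt um := by
  unfold order_authors_in_roles order_authors_in_roles_alt
  have hstep : (fun (d : PySem.Dict String (List String)) (p : String × List (String × Option String)) =>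
      let role := pvRoleOf p.2
      let d := if d.contains role then d else d.insert role ([] : List String)
      d.modify role [] (fun l => l ++ [p.1]))
      = fun d p => d.modify (pvRoleOf p.2) [] (fun l => l ++ [p.1]) := by
    funext d p; exact pv_stepA_eq d (pvRoleOf p.2) p.1
  rw [hstep]
  set S := PySem.List.sorted um (fun kv => kv.1) with hS
  set dA := um.foldl (fun d p => d.modify (pvRoleOf p.2) [] (fun l => l ++ [p.1])) PySem.Dict.empty with hdA
  set d0 := um.foldl (fun d p => d.setdefault (pvRoleOf p.2) ([] : List String)) PySem.Dict.empty with hd0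
  set dB := S.foldl (fun d p => d.modify (pvRoleOf p.2) [] (fun l => l ++ [p.1])) d0 with hdB
  have hKA : dA.keys = PySem.Set.ofList (um.map (fun p => pvRoleOf p.2)) := by
    rw [hdA, pv_grouped_keys]; simp [PySem.Set.update_nil_left]
  have hK0 : d0.keys = PySem.Set.ofList (um.map (fun p => pvRoleOf p.2)) := by
    rw [hd0, pv_setdef_keys]; simp [PySem.Set.update_nil_left]
  have hKB : dB.keys = PySem.Set.ofList (um.map (fun p => pvRoleOf p.2)) := by
    rw [hdB, pv_grouped_keys, hK0]
    apply pv_update_subset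
    intro x hx
    rcases List.mem_map.mp hx with ⟨p, hp, hpx⟩
    exact (PySem.Set.mem_ofList _ _).mpr
      (List.mem_map.mpr ⟨p, (PySem.List.mem_sorted um (fun kv => kv.1) false p).mp hp, hpx⟩)
  have hnd : (PySem.Set.ofList (um.map (fun p => pvRoleOf p.2))).Nodup := PySem.Set.nodup_ofList _
  have hAv : ∀ r, dA.getD r [] = (um.filter (fun p => pvRoleOf p.2 == r)).map (fun p => p.1) := by
    intro r; rw [hdA, pv_grouped_getD]; simp
  have hBv : ∀ r, dB.getD r [] = (S.filter (fun p => pvRoleOf p.2 == r)).map (fun p => p.1) := by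
    intro r; rw [hdB, pv_grouped_getD, hd0, pv_setdef_getD _ _ (fun r => by simp)]; simp
  set d2 := dA.keys.foldl (fun d role => d.modify role [] (fun l => PySem.List.sorted l (fun x => x))) dA with hd2
  have hK2 : d2.keys = dA.keys := pv_sortpass_keys _ _ (fun k hk => hk)
  have h2v : ∀ r ∈ dA.keys, d2.getD r [] = PySem.List.sorted (dA.getD r []) (fun x => x) := by
    intro r hr
    rw [hd2, pv_sortpass_getD dA.keys (by rw [hKA]; exact hnd)]
    simp [hr]
  rw [PySem.Dict.items_eq_map_keys d2 (by rw [hK2, hKA]; exact hnd) [],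
      PySem.Dict.items_eq_map_keys dB (by rw [hKB]; exact hnd) [],
      hK2, hKA, hKB]
  apply List.map_congr_left
  intro r hr
  have hrA : r ∈ dA.keys := by rw [hKA]; exact hr
  rw [h2v r hrA, hAv, hBv]
  exact congrArg (fun l => (r, l)) (pv_bucket_sorted um r)

-- ===== VERDICT (by name: the statement is the Claim_ definition above) =====
theorem order_authors_in_roles_spec : Claim_equal_order_authors_in_roles := by
  intro um _ _
  unfold Spec_order_authors_in_roles
  exact pv_main um
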